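-- pv_equiv track=rewrite | github.com/arnodeceuninck/CLizard | grammar/Simple Grammar/txtToJson.py | addJsonStr
-- ===== SOURCE A (Python) =====
-- charactersToEscape = ["\""]
--
-- def addJsonStr(variable):
--     string = "\""
--     for char in variable:
--         if char in charactersToEscape:
--             string += "\\"
--         string += char
--     string += "\"" + ", "
--     return string
-- ===== SOURCE B (Python) =====
-- def addJsonStr(variable):
--     return '"' + variable.replace('"', '\\"') + '", '
-- ===== Notes on version B (the rewrite author's own statement) =====
-- stated objective: faster
-- what changed: Replaced the per-character accumulator loop (quadratic string appends) with a single str.replace call concatenated between the literal quote delimiters.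
import Mathlib
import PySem

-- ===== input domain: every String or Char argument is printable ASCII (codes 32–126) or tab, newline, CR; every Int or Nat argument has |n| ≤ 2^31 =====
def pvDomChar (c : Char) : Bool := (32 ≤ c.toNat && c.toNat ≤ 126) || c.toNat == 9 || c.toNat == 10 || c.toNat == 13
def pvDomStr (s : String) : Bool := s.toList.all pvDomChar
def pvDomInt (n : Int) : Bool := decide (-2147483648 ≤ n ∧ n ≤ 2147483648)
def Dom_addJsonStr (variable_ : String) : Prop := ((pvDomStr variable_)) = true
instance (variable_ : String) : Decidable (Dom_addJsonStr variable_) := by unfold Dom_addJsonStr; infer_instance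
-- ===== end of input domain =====

-- B drops A's per-character accumulator loop: it escapes with one str.replace between literal quote delimiters (idiomatic).

-- ===== PORT A =====
def charactersToEscape : List String := ["\""]

def addJsonStr (variable_ : String) : String :=
  let string := "\""
  let string := variable_.toList.foldl (fun s c =>
    let s := if charactersToEscape.contains (String.ofList [c]) then s ++ "\\" else s
    s ++ String.ofList [c]) string
  string ++ ("\"" ++ ", ")

-- ===== PORT B =====
def addJsonStr_alt (variable_ : String) : String :=
  "\"" ++ PySem.Str.replace variable_ "\"" "\\\"" ++ "\", "

-- ===== PRECONDITION & SPEC =====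
def Spec_addJsonStr (variable_ : String) (out : String) : Prop := out = addJsonStr_alt variable_
instance (variable_ : String) (out : String) : Decidable (Spec_addJsonStr variable_ out) := by unfold Spec_addJsonStr; infer_instance

-- ===== CLAIM (what is proved, stated in full; the proofs are below) =====
def Claim_equal_addJsonStr : Prop := ∀ (variable_ : String), Dom_addJsonStr variable_ → Spec_addJsonStr variable_ (addJsonStr variable_)

-- ===== LEMMAS AND PROOFS =====

def pvEsc (c : Char) : List Char := if c = '"' then ['\\', '"'] else [c]

theorem pvFoldA (l : List Char) (s : String) :
    (l.foldl (fun s c =>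
      let s := if charactersToEscape.contains (String.ofList [c]) then s ++ "\\" else s
      s ++ String.ofList [c]) s).toList = s.toList ++ l.flatMap pvEsc := by
  induction l generalizing s with
  | nil => simp
  | cons c t ih =>
    simp only [List.foldl_cons, List.flatMap_cons]
    rw [ih]
    by_cases h : c = '"'
    · subst h; simp [pvEsc, charactersToEscape]
    · have hne : String.ofList [c] ≠ "\"" := by
        intro hc
        exact h (by simpa using congrArg String.toList hc)
      simp [pvEsc, charactersToEscape, h, hne]

theorem pvGo (fuel : Nat) (l acc : List Char) (h : l.length ≤ fuel) :
    PySem.Chars.replace.go ['"'] ['\\', '"'] fuel l acc = acc.reverse ++ l.flatMap pvEsc := by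
  induction fuel generalizing l acc with
  | zero =>
    have : l = [] := List.length_eq_zero_iff.mp (Nat.le_zero.mp h)
    subst this; simp [PySem.Chars.replace.go]
  | succ n ih =>
    cases l with
    | nil => simp [PySem.Chars.replace.go]
    | cons c t =>
      rw [PySem.Chars.replace.go]
      by_cases hc : c = '"'
      · subst hc
        have hp : List.isPrefixOf ['"'] ('"' :: t) = true := by simp [List.isPrefixOf]
        simp only [hp, if_true, List.length_cons, List.length_nil, List.drop_succ_cons,
          List.drop_zero]
        rw [ih t _ (Nat.le_of_succ_le_succ h)]
        simp [pvEsc]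
      · have hp : List.isPrefixOf ['"'] (c :: t) = false := by
          simp only [List.isPrefixOf, Bool.and_eq_false_iff, beq_eq_false_iff_ne, ne_eq]
          exact Or.inl fun hh => hc hh.symm
        simp only [hp]
        rw [ih t _ (Nat.le_of_succ_le_succ h)]
        simp [pvEsc, hc]

theorem pvReplace (l : List Char) :
    PySem.Chars.replace l ['"'] ['\\', '"'] = l.flatMap pvEsc := by
  rw [PySem.Chars.replace]
  simp only [List.isEmpty_cons, Bool.false_eq_true, if_false]
  exact pvGo l.length l [] le_rfl

-- ===== VERDICT (by name: the statement is the Claim_ definition above) =====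
theorem addJsonStr_spec : Claim_equal_addJsonStr := by
  intro v _
  unfold Spec_addJsonStr addJsonStr addJsonStr_alt
  apply String.toList_inj.mp
  have hq : ("\"" : String).toList = ['"'] := by decide
  have hqq : ("\\\"" : String).toList = ['\\', '"'] := by decide
  have hB : (PySem.Str.replace v "\"" "\\\"").toList = v.toList.flatMap pvEsc := by
    rw [PySem.Str.replace]
    simp [hq, hqq, pvReplace]
  simp only [String.toList_append, hB, hq]
  rw [pvFoldA]
  simp [hq]
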